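-- pv_equiv track=rewrite | github.com/houhuawei23/arxiv2md | src/arxiv2md_beta/latex/parser.py | _remove_pandoc_divs
-- ===== SOURCE A (Python) =====
-- def _remove_pandoc_divs(markdown: str) -> str:
--     """Remove Pandoc div blocks (::: ... :::).
--
--     Removes blocks like:
--     ::: center
--     :::
--     ::::
--     :::::
--     etc.
--
--     And keeps only the content inside.
--     """
--     # Pattern to match ::: blocks with optional content
--     # Handle nested ::: blocks
--     lines = markdown.split('\n')
--     result_lines = []
--     div_depth = 0
--
--     i = 0
--     while i < len(lines):
--         line = lines[i]
--         stripped = line.strip()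
--
--         # Count consecutive colons at start
--         if stripped.startswith(':::'):
--             colon_count = len(stripped) - len(stripped.lstrip(':'))
--             if colon_count >= 3:
--                 # This is a div marker
--                 if div_depth == 0:
--                     # Start of div block - skip this line
--                     div_depth = colon_count
--                 else:
--                     # End of div block
--                     div_depth = 0
--                 i += 1
--                 continue
--
--         # If we're inside a div block and it's empty or just whitespace, skip
--         if div_depth > 0 and (not stripped or stripped.startswith(':::')):
--             i += 1
--             continue
--
--         # Normal line - add it
--         result_lines.append(line)
--         i += 1
--
--     # Also remove standalone ::: lines
--     result_lines = [line for line in result_lines if not line.strip().startswith(':::')]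
--
--     # Remove consecutive empty lines (more than 2)
--     final_lines = []
--     prev_empty = False
--     for line in result_lines:
--         is_empty = not line.strip()
--         if is_empty and prev_empty:
--             continue  # Skip consecutive empty lines
--         final_lines.append(line)
--         prev_empty = is_empty
--
--     return '\n'.join(final_lines)
-- ===== SOURCE B (Python) =====
-- def _remove_pandoc_divs(markdown: str) -> str:
--     """Single pass: toggle div state on ::: markers, drop empty lines inside
--     divs, and collapse consecutive empty lines inline."""
--     out = []
--     in_div = False
--     prev_empty = False
--     for line in markdown.split('\n'):
--         stripped = line.strip()
--         if stripped.startswith(':::'):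
--             in_div = not in_div
--             continue
--         if in_div and not stripped:
--             continue
--         if not stripped and prev_empty:
--             continue
--         out.append(line)
--         prev_empty = not stripped
--     return '\n'.join(out)
-- ===== Notes on version B (the rewrite author's own statement) =====
-- stated objective: simpler
-- what changed: A's three sequential passes (while-loop over lines with div_depth, then a redundant filter of ::: lines, then an empty-line collapse with prev_empty) are merged into one loop over the lines that maintains in_div and prev_empty together and emits each kept line directly, eliminating both intermediate lists.
import Mathlib
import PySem

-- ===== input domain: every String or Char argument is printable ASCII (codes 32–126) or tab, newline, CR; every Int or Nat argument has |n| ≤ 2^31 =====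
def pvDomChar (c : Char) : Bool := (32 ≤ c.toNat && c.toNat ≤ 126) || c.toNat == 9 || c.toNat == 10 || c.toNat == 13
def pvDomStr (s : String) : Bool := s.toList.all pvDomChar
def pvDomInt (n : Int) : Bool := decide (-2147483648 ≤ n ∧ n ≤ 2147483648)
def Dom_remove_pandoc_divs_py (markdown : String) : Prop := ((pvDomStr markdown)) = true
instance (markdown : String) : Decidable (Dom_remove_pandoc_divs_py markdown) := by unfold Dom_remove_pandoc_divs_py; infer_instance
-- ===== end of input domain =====

-- B replaces A's three passes (div-marker scan, redundant ::: filter, empty-line collapse)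
-- with one loop that carries in_div and prev_empty together; objective: simpler, no speed claim.

-- ===== PORT A =====
-- hand port of stripped.lstrip(':') (lstrip with an explicit char set, not in PySem); exact: drops leading ':' only
def pvLstripColons (s : List Char) : List Char := s.dropWhile (· == ':')

-- A's while loop: state = (remaining lines, div_depth); appends become cons
def pvPassA : List (List Char) → Nat → List (List Char)
  | [], _ => []
  | line :: rest, depth =>
    let stripped := PySem.Chars.strip line
    if PySem.Chars.startswith stripped [':', ':', ':']
        && decide (3 ≤ stripped.length - (pvLstripColons stripped).length) then
      pvPassA rest (if depth = 0 then stripped.length - (pvLstripColons stripped).length else 0)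
    else if decide (0 < depth)
        && (decide (stripped = []) || PySem.Chars.startswith stripped [':', ':', ':']) then
      pvPassA rest depth
    else
      line :: pvPassA rest depth
-- A's second pass: [line for line in result_lines if not line.strip().startswith(':::')]
def pvFilterA (ls : List (List Char)) : List (List Char) :=
  ls.filter (fun line => !(PySem.Chars.startswith (PySem.Chars.strip line) [':', ':', ':']))
-- A's third pass: collapse consecutive empty lines; prev_empty advances only on emitted lines
def pvCollapse : Bool → List (List Char) → List (List Char)
  | _, [] => []
  | prev, line :: rest =>
    if decide (PySem.Chars.strip line = []) && prev then
      pvCollapse prev rest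
    else
      line :: pvCollapse (decide (PySem.Chars.strip line = [])) rest
def remove_pandoc_divs_py (markdown : String) : String :=
  String.ofList (PySem.Chars.join ['\n']
    (pvCollapse false (pvFilterA (pvPassA (PySem.Chars.splitOn markdown.toList ['\n']) 0))))

-- ===== PORT B =====
-- B's single loop: state = (in_div, prev_empty); the emitted lines become the cons results
def pvLoopB : List (List Char) → Bool → Bool → List (List Char)
  | [], _, _ => []
  | line :: rest, inDiv, prev =>
    let stripped := PySem.Chars.strip line
    if PySem.Chars.startswith stripped [':', ':', ':'] then
      pvLoopB rest (!inDiv) prev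
    else if inDiv && decide (stripped = []) then
      pvLoopB rest inDiv prev
    else if decide (stripped = []) && prev then
      pvLoopB rest inDiv prev
    else
      line :: pvLoopB rest inDiv (decide (stripped = []))


def remove_pandoc_divs_py_alt (markdown : String) : String :=
  String.ofList (PySem.Chars.join ['\n']
    (pvLoopB (PySem.Chars.splitOn markdown.toList ['\n']) false false))

-- ===== PRECONDITION & SPEC =====
def Spec_remove_pandoc_divs_py (markdown : String) (out : String) : Prop := out = remove_pandoc_divs_py_alt markdown
instance (markdown : String) (out : String) : Decidable (Spec_remove_pandoc_divs_py markdown out) := by unfold Spec_remove_pandoc_divs_py; infer_instance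

-- ===== CLAIM (what is proved, stated in full; the proofs are below) =====
def Claim_equal_remove_pandoc_divs_py : Prop := ∀ (markdown : String), Dom_remove_pandoc_divs_py markdown → Spec_remove_pandoc_divs_py markdown (remove_pandoc_divs_py markdown)

-- ===== LEMMAS AND PROOFS =====

lemma colon_count_ge_three {s : List Char}
    (h : PySem.Chars.startswith s [':', ':', ':'] = true) :
    3 ≤ s.length - (pvLstripColons s).length := by
  obtain ⟨t, ht⟩ := (PySem.Chars.startswith_iff s [':', ':', ':']).mp h
  subst ht
  have := List.length_dropWhile_le (p := fun c => c == ':') t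
  simp [pvLstripColons, List.dropWhile]
  omega

lemma main_lemma : ∀ (ls : List (List Char)) (depth : Nat) (prev : Bool),
    pvCollapse prev (pvFilterA (pvPassA ls depth)) = pvLoopB ls (decide (0 < depth)) prev := by
  intro ls
  induction ls with
  | nil => intro depth prev; simp [pvPassA, pvFilterA, pvCollapse, pvLoopB]
  | cons line rest ih =>
    intro depth prev
    by_cases hsw : PySem.Chars.startswith (PySem.Chars.strip line) [':', ':', ':'] = true
    · have hcc := colon_count_ge_three hsw
      have hcc' : decide (3 ≤ (PySem.Chars.strip line).length - (pvLstripColons (PySem.Chars.strip line)).length) = true := by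
        simpa using hcc
      rw [pvPassA, pvLoopB]
      simp only [hsw, hcc', Bool.and_self, if_true]
      rw [ih]
      rcases Nat.eq_zero_or_pos depth with h0 | hpos
      · subst h0
        have h1 : (pvLstripColons (PySem.Chars.strip line)).length < (PySem.Chars.strip line).length := by omega
        simp [h1]
      · rw [if_neg (by omega)]
        simp [hpos]
    · have hsw' : PySem.Chars.startswith (PySem.Chars.strip line) [':', ':', ':'] = false :=
        Bool.eq_false_iff.mpr hsw
      rw [pvPassA, pvLoopB]
      simp only [hsw', Bool.false_and, Bool.or_false, Bool.false_eq_true, if_false]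
      by_cases he : PySem.Chars.strip line = []
      · have he' : decide (PySem.Chars.strip line = []) = true := by simp [he]
        rcases Nat.eq_zero_or_pos depth with h0 | hpos
        · have hd : decide (0 < depth) = false := by simp [h0]
          simp only [he', hd, Bool.true_and, Bool.false_eq_true, if_false, Bool.and_true]
          rw [pvFilterA, List.filter_cons, hsw']
          simp only [Bool.not_false, if_true]
          rw [pvCollapse]
          cases prev with
          | true =>
            simp only [he', Bool.and_true, if_true]
            rw [← pvFilterA, ih, hd]
          | false =>
            simp only [he', Bool.and_false, Bool.false_eq_true, if_false]
            rw [← pvFilterA, ih, hd]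
        · have hd : decide (0 < depth) = true := by simp [hpos]
          simp only [he', hd, Bool.true_and, Bool.and_true, if_true]
          rw [ih, hd]
      · have he' : decide (PySem.Chars.strip line = []) = false := by simp [he]
        simp only [he', Bool.and_false, Bool.false_eq_true, if_false]
        by_cases hd : decide (0 < depth) = true
        · simp only [hd]
          rw [pvFilterA, List.filter_cons, hsw']
          simp only [Bool.not_false, if_true]
          rw [pvCollapse]
          simp only [he', Bool.false_and, Bool.false_eq_true, if_false]
          rw [← pvFilterA, ih, hd]
        · have hd' : decide (0 < depth) = false := Bool.eq_false_iff.mpr hd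
          simp only [hd', Bool.false_and]
          rw [pvFilterA, List.filter_cons, hsw']
          simp only [Bool.not_false, if_true]
          rw [pvCollapse]
          simp only [he', Bool.false_and, Bool.false_eq_true, if_false]
          rw [← pvFilterA, ih, hd']

-- ===== VERDICT (by name: the statement is the Claim_ definition above) =====
theorem remove_pandoc_divs_py_spec : Claim_equal_remove_pandoc_divs_py := by
  intro markdown _
  unfold Spec_remove_pandoc_divs_py remove_pandoc_divs_py remove_pandoc_divs_py_alt
  rw [main_lemma]
  norm_num
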